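-- pv_equiv track=rewrite | github.com/vo-lang/volang | scripts/ci/plan.py | task_tools
-- ===== SOURCE A (Python) =====
-- from typing import Any
--
-- def task_tools(name: str, tasks: dict[str, Any], seen: set[str] | None = None) -> set[str]:
--     seen = seen or set()
--     if name in seen:
--         return set()
--     seen.add(name)
--     task = tasks[name]
--     tools = set(task.get("tools", []))
--     for dep in task.get("needs", []):
--         tools.update(task_tools(dep, tasks, seen))
--     return tools
-- ===== SOURCE B (Python) =====
-- def task_tools(name, tasks, seen=None):
--     seen = seen or set()
--     tools = set()
--     stack = [name]
--     while stack:
--         node = stack.pop()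
--         if node in seen:
--             continue
--         seen.add(node)
--         task = tasks[node]
--         tools.update(task.get("tools", []))
--         stack.extend(reversed(task.get("needs", [])))
--     return tools
-- ===== Notes on version B (the rewrite author's own statement) =====
-- stated objective: alternative
-- what changed: The recursive DFS (one fresh set per node, merged upward via tools.update) is replaced by an iterative DFS with an explicit stack (needs pushed in reverse so dependencies are visited in the same left-to-right pre-order) and a single tools accumulator; Pre_ excludes exactly the inputs on which A raises KeyError (a name reachable from `name` along needs edges, not blocked by the passed-in seen set, missing from tasks) and nothing else.
import Mathlib
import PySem

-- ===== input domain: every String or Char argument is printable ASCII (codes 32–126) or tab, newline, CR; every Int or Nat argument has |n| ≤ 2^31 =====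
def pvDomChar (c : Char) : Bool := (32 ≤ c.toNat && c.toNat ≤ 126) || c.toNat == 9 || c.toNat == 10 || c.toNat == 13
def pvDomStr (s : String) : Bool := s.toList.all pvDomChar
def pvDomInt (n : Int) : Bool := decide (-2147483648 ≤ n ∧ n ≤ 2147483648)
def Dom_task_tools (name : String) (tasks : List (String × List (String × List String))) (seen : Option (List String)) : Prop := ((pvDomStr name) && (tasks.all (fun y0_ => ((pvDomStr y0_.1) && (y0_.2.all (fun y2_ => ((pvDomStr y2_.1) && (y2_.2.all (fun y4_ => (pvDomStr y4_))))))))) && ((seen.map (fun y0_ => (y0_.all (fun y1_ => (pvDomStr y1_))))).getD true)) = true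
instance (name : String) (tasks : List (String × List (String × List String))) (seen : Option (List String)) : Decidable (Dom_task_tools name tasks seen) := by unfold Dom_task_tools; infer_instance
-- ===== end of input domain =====

-- B replaces A's recursive DFS by an iterative DFS with an explicit stack and a single
-- tools accumulator (objective: alternative decomposition; equivalence is about the
-- return value — both Pythons also mutate a non-empty `seen` argument identically).

-- shared transliteration of the first line `seen = seen or set()` of both Pythons
def pvSeen0 (seen : Option (List String)) : PySem.Set String :=
  match seen with
  | some l => if l.isEmpty then PySem.Set.empty else l
  | none => PySem.Set.empty

-- ===== PORT A =====
-- `task_tools` recurses on itself; the Lean port threads `seen` explicitly and uses a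
-- fuel parameter only to make the recursion structural (fuel tasks.length+1 is never
-- exhausted: each recursive level permanently marks one distinct key as seen).
mutual
def taskToolsGo (tasks : List (String × List (String × List String))) :
    Nat → String → PySem.Set String → PySem.Set String × PySem.Set String
  | 0, _, seen => (PySem.Set.empty, seen)
  | fuel+1, name, seen =>
    if name ∈ seen then (PySem.Set.empty, seen)           -- if name in seen: return set()
    else
      let seen1 := PySem.Set.add seen name                -- seen.add(name)
      match (PySem.Dict.mk tasks).get? name with          -- task = tasks[name]
      | none => (PySem.Set.empty, seen1)                  -- KeyError in Python: outside Pre_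
      | some task =>
        taskToolsFold tasks fuel ((PySem.Dict.mk task).getD "needs" [])
          (PySem.Set.ofList ((PySem.Dict.mk task).getD "tools" []), seen1)

-- the `for dep in task.get("needs", []): tools.update(task_tools(dep, tasks, seen))` loop
def taskToolsFold (tasks : List (String × List (String × List String))) :
    Nat → List String → PySem.Set String × PySem.Set String → PySem.Set String × PySem.Set String
  | _, [], acc => acc
  | fuel, dep :: deps, acc =>
    let r := taskToolsGo tasks fuel dep acc.2
    taskToolsFold tasks fuel deps (PySem.Set.update acc.1 r.1, r.2)
end

def task_tools (name : String) (tasks : List (String × List (String × List String))) (seen : Option (List String)) : List String :=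
  let seen0 := pvSeen0 seen                               -- seen = seen or set()
  (taskToolsGo tasks (tasks.length + 1) name seen0).1

-- ===== PORT B =====
-- number of task keys not yet seen: the part of the termination measure of B's while loop
def pvUnseen (tasks : List (String × List (String × List String))) (seen : PySem.Set String) : Nat :=
  ((PySem.Set.ofList (tasks.map Prod.fst)).filter (fun k => !(PySem.Set.contains seen k))).length

-- termination helper lemmas for taskToolsLoop (cited in its decreasing_by)
theorem pvSubLenLt {α : Type} {s t : List α} (h : s.Sublist t) {x : α} (hxt : x ∈ t) (hxs : x ∉ s) :
    s.length < t.length := by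
  rcases Nat.lt_or_ge s.length t.length with h' | h'
  · exact h'
  · have : s = t := h.eq_of_length (Nat.le_antisymm h.length_le h')
    exact absurd (this ▸ hxt) hxs

theorem pvUnseen_add_lt (tasks : List (String × List (String × List String)))
    (seen : PySem.Set String) (node : String)
    (hk : node ∈ tasks.map Prod.fst) (hs : node ∉ seen) :
    pvUnseen tasks (PySem.Set.add seen node) < pvUnseen tasks seen := by
  unfold pvUnseen
  apply pvSubLenLt (x := node)
  · apply List.monotone_filter_right
    intro a ha
    simp only [Bool.not_eq_eq_eq_not, Bool.not_true, PySem.Set.contains_eq_listContains] at ha ⊢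
    simp only [List.contains_eq_mem, decide_eq_false_iff_not] at ha ⊢
    intro hmem
    exact ha ((PySem.Set.mem_add seen node a).mpr (Or.inl hmem))
  · simp only [List.mem_filter, PySem.Set.mem_ofList, PySem.Set.contains_eq_listContains,
      List.contains_eq_mem, Bool.not_eq_eq_eq_not, Bool.not_true, decide_eq_false_iff_not]
    exact ⟨hk, hs⟩
  · simp only [List.mem_filter, not_and, PySem.Set.contains_eq_listContains,
      List.contains_eq_mem, Bool.not_eq_eq_eq_not, Bool.not_true, decide_eq_false_iff_not]
    intro _ hno
    exact hno ((PySem.Set.mem_add seen node node).mpr (Or.inr rfl))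

theorem pvMemKeysOfGet {tasks : List (String × List (String × List String))}
    {node : String} {task : List (String × List String)}
    (h : (PySem.Dict.mk tasks).get? node = some task) : node ∈ tasks.map Prod.fst := by
  have hmem := PySem.Dict.mem_items_of_get?_eq_some (PySem.Dict.mk tasks) h
  exact List.mem_map.mpr ⟨(node, task), hmem, rfl⟩

-- `while stack:` of B; the Python list-stack (pop from the end, extend with reversed needs)
-- is modelled with the top of the stack at the HEAD of the list, so pop = head and
-- extend(reversed(needs)) = needs ++ rest.
def taskToolsLoop (tasks : List (String × List (String × List String))) :
    List String → PySem.Set String → PySem.Set String → PySem.Set String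
  | [], _, tools => tools                                  -- stack exhausted: return tools
  | node :: stack, seen, tools =>
    if node ∈ seen then taskToolsLoop tasks stack seen tools   -- if node in seen: continue
    else
      let seen' := PySem.Set.add seen node                 -- seen.add(node)
      match h : (PySem.Dict.mk tasks).get? node with       -- task = tasks[node]
      | none => tools                                      -- KeyError in Python: outside Pre_
      | some task =>
        taskToolsLoop tasks ((PySem.Dict.mk task).getD "needs" [] ++ stack) seen'
          (PySem.Set.update tools ((PySem.Dict.mk task).getD "tools" []))
termination_by stack seen _ => (pvUnseen tasks seen, stack.length)
decreasing_by
  · exact Prod.Lex.right _ (Nat.lt_succ_self _)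
  · exact Prod.Lex.left _ _ (pvUnseen_add_lt tasks seen node (pvMemKeysOfGet h) (by assumption))

def task_tools_alt (name : String) (tasks : List (String × List (String × List String))) (seen : Option (List String)) : List String :=
  let seen0 := pvSeen0 seen                               -- seen = seen or set()
  taskToolsLoop tasks [name] seen0 PySem.Set.empty

-- ===== PRECONDITION & SPEC =====
-- Reachability closure of the `needs` graph, used only by Pre_: successors of a node are
-- its listed needs, except that a node in the initial seen set (never expanded by A) and
-- a node missing from tasks (where A raises before expanding) have none; the closure is
-- that relation's reflexive-transitive closure of {name}, reached as the fixed point of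
-- one-step expansion (stable after as many rounds as there are listed needs overall).
def pvSucc (tasks : List (String × List (String × List String)))
    (seen0 : PySem.Set String) (n : String) : List String :=
  if n ∈ seen0 then []
  else match (PySem.Dict.mk tasks).get? n with
    | none => []
    | some task => (PySem.Dict.mk task).getD "needs" []

def pvStep (tasks : List (String × List (String × List String)))
    (seen0 : PySem.Set String) (S : PySem.Set String) : PySem.Set String :=
  PySem.Set.update S (S.flatMap (pvSucc tasks seen0))

def pvClosure (tasks : List (String × List (String × List String)))
    (seen0 : PySem.Set String) (name : String) : PySem.Set String :=
  (pvStep tasks seen0)^[(tasks.flatMap (fun p => (PySem.Dict.mk p.2).getD "needs" [])).length + 1]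
    (PySem.Set.ofList [name])

-- Pre_ excludes exactly the inputs on which the Python A raises KeyError: those where some
-- name reachable from `name` along needs edges (not blocked by the passed-in seen set) is
-- neither in that seen set nor a key of `tasks`; on every input where A returns, Pre_ holds.
def Pre_task_tools (name : String) (tasks : List (String × List (String × List String))) (seen : Option (List String)) : Prop :=
  ∀ n ∈ pvClosure tasks (pvSeen0 seen) name, n ∈ pvSeen0 seen ∨ n ∈ tasks.map Prod.fst
instance (name : String) (tasks : List (String × List (String × List String))) (seen : Option (List String)) : Decidable (Pre_task_tools name tasks seen) := by unfold Pre_task_tools; infer_instance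

def pvWitness_task_tools : String × (List (String × List (String × List String))) × Option (List String) :=
  ("a", [("a", [("tools", ["t1"]), ("needs", ["b"])]), ("b", [("tools", ["t2"])])], none)

def Spec_task_tools (name : String) (tasks : List (String × List (String × List String))) (seen : Option (List String)) (out : List String) : Prop := out = task_tools_alt name tasks seen
instance (name : String) (tasks : List (String × List (String × List String))) (seen : Option (List String)) (out : List String) : Decidable (Spec_task_tools name tasks seen out) := by unfold Spec_task_tools; infer_instance

-- ===== CLAIM (what is proved, stated in full; the proofs are below) =====
def Claim_equal_task_tools : Prop := ∀ (name : String) (tasks : List (String × List (String × List String))) (seen : Option (List String)), Dom_task_tools name tasks seen → Pre_task_tools name tasks seen → Spec_task_tools name tasks seen (task_tools name tasks seen)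

-- ===== LEMMAS AND PROOFS =====

-- the closure machinery: each expansion step extends the set, stays inside the finite
-- carrier, and therefore reaches a fixed point within the iteration budget
theorem pvStep_prefix (tasks : List (String × List (String × List String)))
    (seen0 S : PySem.Set String) : S <+: pvStep tasks seen0 S := by
  unfold pvStep
  rw [PySem.Set.update_eq_append_filter]
  exact List.prefix_append _ _

theorem pvSucc_subset (tasks : List (String × List (String × List String)))
    (seen0 : PySem.Set String) (n : String) :
    ∀ d ∈ pvSucc tasks seen0 n, d ∈ tasks.flatMap (fun p => (PySem.Dict.mk p.2).getD "needs" []) := by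
  intro d hd
  unfold pvSucc at hd
  by_cases h : n ∈ seen0
  · rw [if_pos h] at hd; cases hd
  · rw [if_neg h] at hd
    cases htask : (PySem.Dict.mk tasks).get? n with
    | none => rw [htask] at hd; cases hd
    | some task =>
      rw [htask] at hd
      exact List.mem_flatMap.mpr ⟨(n, task), PySem.Dict.mem_items_of_get?_eq_some _ htask, hd⟩

theorem pvIter_nodup_sub (tasks : List (String × List (String × List String)))
    (seen0 : PySem.Set String) (name : String) :
    ∀ k, ((pvStep tasks seen0)^[k] (PySem.Set.ofList [name])).Nodup ∧
      ∀ x ∈ (pvStep tasks seen0)^[k] (PySem.Set.ofList [name]),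
        x ∈ name :: tasks.flatMap (fun p => (PySem.Dict.mk p.2).getD "needs" []) := by
  intro k
  induction k with
  | zero =>
    refine ⟨PySem.Set.nodup_ofList _, ?_⟩
    intro x hx
    have := (PySem.Set.mem_ofList _ _).mp hx
    simp only [List.mem_singleton] at this
    simp [this]
  | succ k ih =>
    rw [Function.iterate_succ_apply']
    refine ⟨PySem.Set.nodup_update _ _ ih.1, ?_⟩
    intro x hx
    unfold pvStep at hx
    rcases (PySem.Set.mem_update _ _ _).mp hx with h | h
    · exact ih.2 x h
    · rcases List.mem_flatMap.mp h with ⟨n, _, hd⟩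
      exact List.mem_cons_of_mem _ (pvSucc_subset tasks seen0 n x hd)

theorem pvClosureClosed (tasks : List (String × List (String × List String)))
    (seen0 : PySem.Set String) (name : String) :
    pvStep tasks seen0 (pvClosure tasks seen0 name) = pvClosure tasks seen0 name := by
  unfold pvClosure
  set f := pvStep tasks seen0 with hf
  set s0 := PySem.Set.ofList [name] with hs0
  set K := (tasks.flatMap (fun p => (PySem.Dict.mk p.2).getD "needs" [])).length + 1 with hK
  have hex : ∃ i, i < K ∧ f^[i+1] s0 = f^[i] s0 := by
    by_contra hc
    push Not at hc
    have hgrow : ∀ i, i ≤ K → i + 1 ≤ (f^[i] s0).length := by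
      intro i
      induction i with
      | zero =>
        intro _
        have h1 : s0 = [name] := PySem.Set.ofList_eq_self_of_nodup _ (by simp)
        simp [h1]
      | succ i ih =>
        intro hi
        have h1 := ih (Nat.le_of_succ_le hi)
        have hne := hc i (Nat.lt_of_succ_le hi)
        have hpfx := pvStep_prefix tasks seen0 (f^[i] s0)
        have hle := hpfx.length_le
        rw [Function.iterate_succ_apply']
        rcases Nat.lt_or_ge (f^[i] s0).length (f (f^[i] s0)).length with h | h
        · omega
        · exfalso
          apply hne
          rw [Function.iterate_succ_apply']
          exact (hpfx.eq_of_length (Nat.le_antisymm hle h)).symm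
    have hKlen := hgrow K le_rfl
    have hsub := pvIter_nodup_sub tasks seen0 name K
    have hb : (f^[K] s0).length ≤ K := by
      have h1 := (hsub.1.subperm hsub.2).length_le
      simpa [hK] using h1
    omega
  obtain ⟨i, hiK, heq⟩ := hex
  have stable : ∀ j, f^[i+j] s0 = f^[i] s0 := by
    intro j
    induction j with
    | zero => rfl
    | succ j ih =>
      have h1 : i + (j+1) = (i+j) + 1 := rfl
      calc f^[i+(j+1)] s0 = f (f^[i+j] s0) := by rw [h1, Function.iterate_succ_apply']
        _ = f (f^[i] s0) := by rw [ih]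
        _ = f^[i+1] s0 := (Function.iterate_succ_apply' f i s0).symm
        _ = f^[i] s0 := heq
  have hKi : K = i + (K - i) := by omega
  have h2 : f^[K] s0 = f^[i] s0 := by rw [hKi]; exact stable _
  calc f (f^[K] s0) = f (f^[i] s0) := by rw [h2]
    _ = f^[i+1] s0 := (Function.iterate_succ_apply' f i s0).symm
    _ = f^[i] s0 := heq
    _ = f^[K] s0 := h2.symm

theorem pvMem_closure (tasks : List (String × List (String × List String)))
    (seen0 : PySem.Set String) (name : String) : name ∈ pvClosure tasks seen0 name := by
  unfold pvClosure
  generalize (tasks.flatMap (fun p => (PySem.Dict.mk p.2).getD "needs" [])).length + 1 = k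
  induction k with
  | zero =>
    have h1 : PySem.Set.ofList [name] = [name] := PySem.Set.ofList_eq_self_of_nodup _ (by simp)
    simp [h1]
  | succ k ih =>
    rw [Function.iterate_succ_apply']
    exact (pvStep_prefix tasks seen0 _).subset ih

-- unfolding equations for the two recursions
theorem pvLoopNil (tasks : List (String × List (String × List String)))
    (seen tools : PySem.Set String) : taskToolsLoop tasks [] seen tools = tools := by
  simp [taskToolsLoop]

theorem pvLoopMem (tasks : List (String × List (String × List String)))
    {node : String} {seen : PySem.Set String} (stack : List String) (tools : PySem.Set String)
    (h : node ∈ seen) :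
    taskToolsLoop tasks (node :: stack) seen tools = taskToolsLoop tasks stack seen tools := by
  rw [taskToolsLoop]
  simp [h]

theorem pvLoopHit (tasks : List (String × List (String × List String)))
    {node : String} {seen : PySem.Set String} {task : List (String × List String)}
    (stack : List String) (tools : PySem.Set String)
    (h : node ∉ seen) (ht : (PySem.Dict.mk tasks).get? node = some task) :
    taskToolsLoop tasks (node :: stack) seen tools
      = taskToolsLoop tasks ((PySem.Dict.mk task).getD "needs" [] ++ stack)
          (PySem.Set.add seen node)
          (PySem.Set.update tools ((PySem.Dict.mk task).getD "tools" [])) := by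
  rw [taskToolsLoop]
  simp only [if_neg h]
  split
  · next heq => rw [ht] at heq; cases heq
  · next t heq => rw [ht] at heq; cases heq; rfl

theorem pvGoMem (tasks : List (String × List (String × List String))) (fuel : Nat)
    {name : String} {seen : PySem.Set String} (h : name ∈ seen) :
    taskToolsGo tasks (fuel + 1) name seen = (PySem.Set.empty, seen) := by
  rw [taskToolsGo]
  simp [h]

theorem pvGoHit (tasks : List (String × List (String × List String))) (fuel : Nat)
    {name : String} {seen : PySem.Set String} {task : List (String × List String)}
    (h : name ∉ seen) (ht : (PySem.Dict.mk tasks).get? name = some task) :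
    taskToolsGo tasks (fuel + 1) name seen
      = taskToolsFold tasks fuel ((PySem.Dict.mk task).getD "needs" [])
          (PySem.Set.ofList ((PySem.Dict.mk task).getD "tools" []), PySem.Set.add seen name) := by
  rw [taskToolsGo]
  simp only [if_neg h]
  split
  · next heq => rw [ht] at heq; cases heq
  · next t heq => rw [ht] at heq; cases heq; rfl

-- ordered-union (Set.update) algebra
theorem pvAddUpdate {s t : PySem.Set String} {x : String} :
    PySem.Set.add (PySem.Set.update s t) x = PySem.Set.update s (PySem.Set.add t x) := by
  by_cases hx : x ∈ t
  · rw [PySem.Set.add_of_mem hx,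
      PySem.Set.add_of_mem ((PySem.Set.mem_update s t x).mpr (Or.inr hx))]
  · rw [PySem.Set.add_of_not_mem hx, PySem.Set.update_append]
    rw [PySem.Set.update_cons, PySem.Set.update_nil]

theorem pvUpdateAssoc (s t u : List String) :
    PySem.Set.update (PySem.Set.update s t) u = PySem.Set.update s (PySem.Set.update t u) := by
  induction u generalizing t with
  | nil => rw [PySem.Set.update_nil, PySem.Set.update_nil]
  | cons x u ih =>
    rw [PySem.Set.update_cons, PySem.Set.update_cons, pvAddUpdate, ih]

theorem pvUpdateOfList (s : PySem.Set String) (xs : List String) :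
    PySem.Set.update s (PySem.Set.ofList xs) = PySem.Set.update s xs := by
  induction xs using List.reverseRecOn with
  | nil => rfl
  | append_singleton xs x ih =>
    rw [PySem.Set.ofList_append_singleton, PySem.Set.update_append]
    have hsing : ∀ u : PySem.Set String, PySem.Set.update u [x] = PySem.Set.add u x := by
      intro u; rw [PySem.Set.update_cons, PySem.Set.update_nil]
    by_cases hx : x ∈ PySem.Set.ofList xs
    · rw [PySem.Set.add_of_mem hx, ih, hsing,
        PySem.Set.add_of_mem ((PySem.Set.mem_update s xs x).mpr
          (Or.inr ((PySem.Set.mem_ofList xs x).mp hx)))]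
    · rw [PySem.Set.add_of_not_mem hx, PySem.Set.update_append, ih, hsing]

-- `seen` only grows under A's recursion
theorem pvGoSeenMono (tasks : List (String × List (String × List String))) :
    ∀ fuel name seen, seen ⊆ (taskToolsGo tasks fuel name seen).2 := by
  intro fuel
  induction fuel with
  | zero => intro name seen x hx; simpa [taskToolsGo] using hx
  | succ fuel ih =>
    have hfold : ∀ deps acc, acc.2 ⊆ (taskToolsFold tasks fuel deps acc).2 := by
      intro deps
      induction deps with
      | nil => intro acc x hx; simpa [taskToolsFold] using hx
      | cons d ds ihd =>
        intro acc x hx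
        simp only [taskToolsFold]
        exact ihd _ (ih d acc.2 hx)
    intro name seen x hx
    simp only [taskToolsGo]
    split
    · exact hx
    · split
      · exact (PySem.Set.mem_add seen name x).mpr (Or.inl hx)
      · exact hfold _ _ ((PySem.Set.mem_add seen name x).mpr (Or.inl hx))

theorem pvUnseenMono (tasks : List (String × List (String × List String)))
    {s s' : PySem.Set String} (h : s ⊆ s') : pvUnseen tasks s' ≤ pvUnseen tasks s := by
  unfold pvUnseen
  apply List.Sublist.length_le
  apply List.monotone_filter_right
  intro a ha
  simp only [PySem.Set.contains_eq_listContains, List.contains_eq_mem,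
    Bool.not_eq_eq_eq_not, Bool.not_true, decide_eq_false_iff_not] at ha ⊢
  exact fun hm => ha (h hm)

-- A's returned tools set has no duplicates
theorem pvGoNodup (tasks : List (String × List (String × List String))) :
    ∀ fuel name seen, ((taskToolsGo tasks fuel name seen).1).Nodup := by
  intro fuel
  induction fuel with
  | zero => intro name seen; simp [taskToolsGo, PySem.Set.empty]
  | succ fuel ih =>
    have hfold : ∀ deps acc, (acc.1 : List String).Nodup →
        ((taskToolsFold tasks fuel deps acc).1).Nodup := by
      intro deps
      induction deps with
      | nil => intro acc h; simpa [taskToolsFold] using h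
      | cons d ds ihd =>
        intro acc h
        simp only [taskToolsFold]
        exact ihd _ (PySem.Set.nodup_update _ _ h)
    intro name seen
    simp only [taskToolsGo]
    split
    · simp [PySem.Set.empty]
    · split
      · simp [PySem.Set.empty]
      · exact hfold _ _ (PySem.Set.nodup_ofList _)

-- THE BRIDGE: with every node reachable from the stack head lying in a closed, safe set C
-- (closed under pvSucc; every member keyed or initially seen), running B's loop on
-- `name :: stack` performs exactly A's recursive call on `name` (same seen evolution,
-- tools appended in the same first-occurrence order)
theorem pvBridge (tasks : List (String × List (String × List String)))
    (seen0 C : PySem.Set String)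
    (hclosed : ∀ n ∈ C, ∀ d ∈ pvSucc tasks seen0 n, d ∈ C)
    (hsafe : ∀ n ∈ C, n ∈ seen0 ∨ n ∈ tasks.map Prod.fst) :
    ∀ fuel name seen stack tools,
      pvUnseen tasks seen < fuel →
      (∀ x ∈ seen0, x ∈ (seen : PySem.Set String)) →
      (name ∈ C ∨ name ∈ seen) →
      taskToolsLoop tasks (name :: stack) seen tools
        = taskToolsLoop tasks stack (taskToolsGo tasks fuel name seen).2
            (PySem.Set.update tools (taskToolsGo tasks fuel name seen).1) := by
  intro fuel
  induction fuel with
  | zero => intro name seen stack tools hf; omega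
  | succ fuel ih =>
    have hfold : ∀ deps, (∀ d ∈ deps, d ∈ C) →
        ∀ (seen' : PySem.Set String) acc stack tools, pvUnseen tasks seen' < fuel →
        (∀ x ∈ seen0, x ∈ seen') →
        taskToolsLoop tasks (deps ++ stack) seen' (PySem.Set.update tools acc)
          = taskToolsLoop tasks stack (taskToolsFold tasks fuel deps (acc, seen')).2
              (PySem.Set.update tools (taskToolsFold tasks fuel deps (acc, seen')).1) := by
      intro deps
      induction deps with
      | nil => intro _ seen' acc stack tools _ _; simp [taskToolsFold]
      | cons d ds ihd =>
        intro hmem seen' acc stack tools hf hs0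
        have hd : d ∈ C := hmem d (by simp)
        have h1 : taskToolsLoop tasks (d :: (ds ++ stack)) seen' (PySem.Set.update tools acc)
            = taskToolsLoop tasks (ds ++ stack) (taskToolsGo tasks fuel d seen').2
                (PySem.Set.update (PySem.Set.update tools acc) (taskToolsGo tasks fuel d seen').1) :=
          ih d seen' (ds ++ stack) (PySem.Set.update tools acc) hf hs0 (Or.inl hd)
        simp only [List.cons_append, h1, pvUpdateAssoc]
        rw [ihd (fun x hx => hmem x (by simp [hx])) _ _ stack tools
          (lt_of_le_of_lt (pvUnseenMono tasks (pvGoSeenMono tasks fuel d seen')) hf)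
          (fun x hx => pvGoSeenMono tasks fuel d seen' (hs0 x hx))]
        simp only [taskToolsFold]
    intro name seen stack tools hf hs0 hname
    by_cases hmem : name ∈ seen
    · rw [pvLoopMem tasks stack tools hmem, pvGoMem tasks fuel hmem]
      simp [PySem.Set.update_nil]
    · have hC : name ∈ C := hname.resolve_right hmem
      have hns0 : name ∉ seen0 := fun h => hmem (hs0 name h)
      have hk : name ∈ tasks.map Prod.fst := (hsafe name hC).resolve_left hns0
      obtain ⟨task, htask⟩ : ∃ task, (PySem.Dict.mk tasks).get? name = some task := by
        cases h : (PySem.Dict.mk tasks).get? name with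
        | none =>
          exact absurd ((PySem.Dict.get?_eq_none_iff_not_mem_keys _ _).mp h)
            (by simpa [PySem.Dict.keys_mk] using hk)
        | some t => exact ⟨t, rfl⟩
      have hsucc : pvSucc tasks seen0 name = (PySem.Dict.mk task).getD "needs" [] := by
        unfold pvSucc
        rw [if_neg hns0]
        split
        · next heq => rw [htask] at heq; cases heq
        · next t heq => rw [htask] at heq; cases heq; rfl
      have hneeds : ∀ d ∈ (PySem.Dict.mk task).getD "needs" [], d ∈ C := by
        intro d hdm
        exact hclosed name hC d (hsucc ▸ hdm)
      have hlt : pvUnseen tasks (PySem.Set.add seen name) < fuel :=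
        lt_of_lt_of_le (pvUnseen_add_lt tasks seen name hk hmem) (Nat.lt_succ_iff.mp hf)
      rw [pvLoopHit tasks stack tools hmem htask, pvGoHit tasks fuel hmem htask,
        ← pvUpdateOfList tools ((PySem.Dict.mk task).getD "tools" [])]
      exact hfold _ hneeds (PySem.Set.add seen name)
        (PySem.Set.ofList ((PySem.Dict.mk task).getD "tools" [])) stack tools hlt
        (fun x hx => (PySem.Set.mem_add seen name x).mpr (Or.inl (hs0 x hx)))

-- ===== VERDICT (by name: the statement is the Claim_ definition above) =====
theorem task_tools_spec : Claim_equal_task_tools := by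
  intro name tasks seen _ hpre
  unfold Pre_task_tools at hpre
  unfold Spec_task_tools
  have hclosed : ∀ n ∈ pvClosure tasks (pvSeen0 seen) name,
      ∀ d ∈ pvSucc tasks (pvSeen0 seen) n, d ∈ pvClosure tasks (pvSeen0 seen) name := by
    intro n hn d hd
    rw [← pvClosureClosed tasks (pvSeen0 seen) name]
    unfold pvStep
    exact (PySem.Set.mem_update _ _ _).mpr (Or.inr (List.mem_flatMap.mpr ⟨n, hn, hd⟩))
  have hf : pvUnseen tasks (pvSeen0 seen) < tasks.length + 1 := by
    have h1 : pvUnseen tasks (pvSeen0 seen) ≤ (PySem.Set.ofList (tasks.map Prod.fst)).length :=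
      List.length_filter_le _ _
    have h2 := PySem.Set.length_ofList_le (tasks.map Prod.fst)
    simp only [List.length_map] at h2
    omega
  show (taskToolsGo tasks (tasks.length + 1) name (pvSeen0 seen)).1
    = taskToolsLoop tasks [name] (pvSeen0 seen) PySem.Set.empty
  rw [pvBridge tasks (pvSeen0 seen) (pvClosure tasks (pvSeen0 seen) name) hclosed hpre
    (tasks.length + 1) name (pvSeen0 seen) [] PySem.Set.empty hf (fun _ hx => hx)
    (Or.inl (pvMem_closure tasks (pvSeen0 seen) name)), pvLoopNil]
  show _ = PySem.Set.update [] (taskToolsGo tasks (tasks.length + 1) name (pvSeen0 seen)).1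
  rw [PySem.Set.update_nil_left,
    PySem.Set.ofList_eq_self_of_nodup _ (pvGoNodup tasks (tasks.length + 1) name (pvSeen0 seen))]
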